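-- pv_equiv track=rewrite | github.com/ericmerle3789/Collatz-Junction-Theorem | scripts/research/r20_equidistribution.py | enum_corrsum_residues
-- ===== SOURCE A (Python) =====
-- from math import comb, gcd, log, log2, ceil, floor, sqrt, pi, exp
-- from itertools import combinations
-- from collections import Counter, defaultdict
--
-- def compute_S(k):
--     """S = ceil(k * log2(3)), exact via integer comparison."""
--     S = ceil(k * log2(3))
--     while (1 << S) <= 3**k:
--         S += 1
--     while S > 0 and (1 << (S - 1)) > 3**k:
--         S -= 1
--     return S
--
-- def corrsum_mod(A, k, mod):
--     """corrSum(A) mod `mod`."""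
--     result = 0
--     for j in range(k):
--         result = (result + pow(3, k - 1 - j, mod) * pow(2, A[j], mod)) % mod
--     return result
--
-- def enum_compositions(k, max_count=500000):
--     """Enumerate all valid compositions A for given k.
--     Returns list of tuples. Returns None if C(S-1,k-1) > max_count."""
--     S = compute_S(k)
--     C = comb(S - 1, k - 1)
--     if C > max_count:
--         return None
--     # A = (0, a1, ..., a_{k-1}) with 0 < a1 < ... < a_{k-1} <= S-1
--     comps = []
--     for rest in combinations(range(1, S), k - 1):
--         A = (0,) + rest
--         comps.append(A)
--     return comps
--
-- def enum_corrsum_residues(k, p, max_count=500000):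
--     """Return Counter of corrSum mod p for all compositions."""
--     comps = enum_compositions(k, max_count)
--     if comps is None:
--         return None
--     counts = Counter()
--     for A in comps:
--         r = corrsum_mod(A, k, p)
--         counts[r] += 1
--     return counts
-- ===== SOURCE B (Python) =====
-- from math import comb, ceil, log2
-- from collections import Counter
--
-- def compute_S(k):
--     """S = ceil(k * log2(3)), exact via integer comparison."""
--     S = ceil(k * log2(3))
--     while (1 << S) <= 3**k:
--         S += 1
--     while S > 0 and (1 << (S - 1)) > 3**k:
--         S -= 1
--     return S
--
-- def enum_corrsum_residues(k, p, max_count=500000):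
--     """Return Counter of corrSum mod p for all compositions.
--
--     Instead of materialising every composition and re-scoring it from scratch,
--     walk the tree of increasing tails (0, a1 < ... < a_{k-1} <= S-1) depth-first,
--     carrying the partial residue along shared prefixes; leaves are counted directly.
--     """
--     S = compute_S(k)
--     if comb(S - 1, k - 1) > max_count:
--         return None
--     counts = Counter()
--
--     def dfs(start, t, r):
--         # t choices left; current partial residue r; next element >= start
--         if t == 0:
--             counts[r] += 1
--             return
--         for a in range(start, S - t + 1):  # leave room for the t-1 remaining picks
--             dfs(a + 1, t - 1, (r + pow(3, t - 1, p) * pow(2, a, p)) % p)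
--
--     dfs(1, k - 1, pow(3, k - 1, p) * pow(2, 0, p) % p)
--     return counts
-- ===== Notes on version B (the rewrite author's own statement) =====
-- stated objective: alternative
-- what changed: Instead of materialising the full list of compositions with itertools.combinations and then re-scoring each one from scratch with an O(k) loop of two modpow calls per element, B walks the tree of increasing tails depth-first, carrying the partial residue along shared prefixes (one modpow pair per tree node, pruned to viable branches) and counting at the leaves, with no intermediate list; same asymptotic cost, much less memory in the enumeration regime.
import Mathlib
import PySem

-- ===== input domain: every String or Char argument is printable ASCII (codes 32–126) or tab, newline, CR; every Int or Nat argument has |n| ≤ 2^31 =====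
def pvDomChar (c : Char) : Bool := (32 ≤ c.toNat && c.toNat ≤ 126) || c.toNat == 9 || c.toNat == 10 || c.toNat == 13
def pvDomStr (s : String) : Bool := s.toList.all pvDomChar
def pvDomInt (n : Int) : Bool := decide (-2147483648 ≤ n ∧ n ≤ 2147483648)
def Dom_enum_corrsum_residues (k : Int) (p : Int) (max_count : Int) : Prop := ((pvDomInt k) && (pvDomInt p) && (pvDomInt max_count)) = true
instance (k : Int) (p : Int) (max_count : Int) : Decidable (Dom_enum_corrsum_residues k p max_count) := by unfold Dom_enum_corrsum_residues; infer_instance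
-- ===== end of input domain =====

-- B replaces A's materialise-all-combinations-then-rescore (a fresh O(k) modpow loop per
-- composition) by one depth-first walk of the composition tree that carries the partial
-- residue along shared prefixes and builds no intermediate list (objective: alternative).

-- ===== PORT A =====
-- compute_S: the two `while` loops of the Python.  The float seed `ceil(k*log2(3))` only
-- seeds these exact-integer correction loops; for k ≥ 0 their result is the unique minimal
-- S with 2^S > 3^k, independent of the seed, so the port seeds with 0 (exact for k ≥ 0;
-- Python raises on k < 0, which Pre_ excludes).
def pvCsUp (t : Nat) (S : Nat) : Nat :=
  if h : 2 ^ S ≤ t then pvCsUp t (S + 1) else S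
termination_by t + 1 - 2 ^ S
decreasing_by
  have h1 : 1 ≤ 2 ^ S := Nat.one_le_two_pow
  omega

def pvCsDown (t : Nat) (S : Nat) : Nat :=
  if h : 0 < S ∧ 2 ^ (S - 1) > t then pvCsDown t (S - 1) else S
termination_by S
decreasing_by omega

def pvComputeS (k : Int) : Int :=
  ((pvCsDown (3 ^ k.toNat) (pvCsUp (3 ^ k.toNat) 0) : Nat) : Int)

-- corrsum_mod: `pow(b, e, m)` is PySem.Int.powMod; both exponents are ≥ 0 at every use
-- (j < k and A[j] ≥ 0), so `.toNat` is exact.  A[j] is always in range in A's only use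
-- (len A = k); pyGetD's default is never reached.
def pvCorrsumMod (A : List Int) (k : Int) (p : Int) : Int :=
  (PySem.List.pyRange 0 k 1).foldl
    (fun result j =>
      PySem.Int.mod
        (result + PySem.Int.powMod 3 (k - 1 - j).toNat p
                  * PySem.Int.powMod 2 (PySem.List.pyGetD A j 0).toNat p) p)
    0

def pvEnumCompositions (k : Int) (max_count : Int) : Option (List (List Int)) :=
  -- S and C are Python locals, inlined here
  if (Nat.choose ((pvComputeS k).toNat - 1) (k - 1).toNat : Int) > max_count then none
  else
    some ((PySem.List.combinations (PySem.List.pyRange 1 (pvComputeS k) 1) (k - 1).toNat).foldl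
      (fun comps rest => comps ++ [0 :: rest]) [])

def enum_corrsum_residues (k : Int) (p : Int) (max_count : Int) : Option (List (Int × Int)) :=
  match pvEnumCompositions k max_count with
  | none => none
  | some comps =>
      some ((comps.foldl
        (fun counts A => counts.modify (pvCorrsumMod A k p) 0 (· + 1))
        (PySem.Dict.empty : PySem.Dict Int Int)).items)

-- ===== PORT B =====
-- Source B's compute_S is textually A's; it is ported once as pvComputeS above.
-- dfs(start, t, r): t picks left, next pick ≥ start, partial residue r.
def pvDfs (p S : Int) : Nat → Int → Int → PySem.Dict Int Int → PySem.Dict Int Int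
  | 0, _start, r, counts => counts.modify r 0 (· + 1)
  | t + 1, start, r, counts =>
      (PySem.List.pyRange start (S - ((t : Int) + 1) + 1) 1).foldl
        (fun cs a => pvDfs p S t (a + 1)
          (PySem.Int.mod (r + PySem.Int.powMod 3 t p * PySem.Int.powMod 2 a.toNat p) p) cs)
        counts

def enum_corrsum_residues_alt (k : Int) (p : Int) (max_count : Int) : Option (List (Int × Int)) :=
  -- S is a Python local, inlined here
  if (Nat.choose ((pvComputeS k).toNat - 1) (k - 1).toNat : Int) > max_count then none
  else
    some ((pvDfs p (pvComputeS k) (k - 1).toNat 1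
      (PySem.Int.mod (PySem.Int.powMod 3 (k - 1).toNat p * PySem.Int.powMod 2 0 p) p)
      (PySem.Dict.empty : PySem.Dict Int Int)).items)

-- ===== PRECONDITION & SPEC =====
-- Pre_ excludes exactly the inputs on which Python A raises: k ≤ 0 (ValueError from the
-- negative shift / comb), and p = 0 while the composition count C(S-1, k-1) is within
-- max_count (pow() with zero modulus); with the count over budget A returns None before
-- ever using p, so those p = 0 inputs stay inside Pre_.  S-1 = ⌊log2 3^k⌋ for k ≥ 1.
def Pre_enum_corrsum_residues (k : Int) (p : Int) (max_count : Int) : Prop :=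
  1 ≤ k ∧ (p ≠ 0 ∨ max_count < (Nat.choose (Nat.log2 (3 ^ k.toNat)) (k.toNat - 1) : Int))
instance (k : Int) (p : Int) (max_count : Int) : Decidable (Pre_enum_corrsum_residues k p max_count) := by unfold Pre_enum_corrsum_residues; infer_instance

def pvWitness_enum_corrsum_residues : Int × Int × Int := (3, 5, 500000)

def Spec_enum_corrsum_residues (k : Int) (p : Int) (max_count : Int) (out : Option (List (Int × Int))) : Prop := out = enum_corrsum_residues_alt k p max_count
instance (k : Int) (p : Int) (max_count : Int) (out : Option (List (Int × Int))) : Decidable (Spec_enum_corrsum_residues k p max_count out) := by unfold Spec_enum_corrsum_residues; infer_instance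

-- ===== CLAIM (what is proved, stated in full; the proofs are below) =====
def Claim_equal_enum_corrsum_residues : Prop := ∀ (k : Int) (p : Int) (max_count : Int), Dom_enum_corrsum_residues k p max_count → Pre_enum_corrsum_residues k p max_count → Spec_enum_corrsum_residues k p max_count (enum_corrsum_residues k p max_count)

-- ===== LEMMAS AND PROOFS =====

-- The residue a composition's tail contributes, consumed left to right; the element with
-- `rest` elements after it carries coefficient 3^rest (it sits at index k-1-rest).
def pvFinish (p : Int) : List Int → Int → Int
  | [], r => r
  | a :: c, r =>
      pvFinish p c
        (PySem.Int.mod (r + PySem.Int.powMod 3 c.length p * PySem.Int.powMod 2 a.toNat p) p)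

lemma pvEnumFold (p k : Int) :
    ∀ (c : List Int) (s r : Int), s + (c.length : Int) = k →
      (PySem.List.enumerate c s).foldl
        (fun res pr =>
          PySem.Int.mod
            (res + PySem.Int.powMod 3 (k - 1 - pr.1).toNat p
                   * PySem.Int.powMod 2 (pr.2).toNat p) p) r
        = pvFinish p c r := by
  intro c
  induction c with
  | nil => intro s r _; simp [PySem.List.enumerate_nil, pvFinish]
  | cons a c ih =>
      intro s r h
      rw [PySem.List.enumerate_cons]
      simp only [List.foldl_cons]
      have hlen : (k - 1 - s).toNat = c.length := by
        simp [List.length_cons] at h; omega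
      rw [hlen]
      exact ih (s + 1) _ (by simp [List.length_cons] at h ⊢; omega)

lemma pvCorrsum_eq_finish (p k : Int) (c : List Int) (hk : ((0 :: c).length : Int) = k) :
    pvCorrsumMod (0 :: c) k p
      = pvFinish p c (PySem.Int.mod (PySem.Int.powMod 3 (k - 1).toNat p * PySem.Int.powMod 2 0 p) p) := by
  unfold pvCorrsumMod
  have hk' : k = PySem.List.len (0 :: c) := by rw [PySem.List.len_eq, hk]
  rw [hk']
  show List.foldl
      (fun (res : Int) (j : Int) =>
        (fun (res : Int) (pr : Int × Int) =>
            PySem.Int.mod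
              (res + PySem.Int.powMod 3 (PySem.List.len (0 :: c) - 1 - pr.1).toNat p
                     * PySem.Int.powMod 2 pr.2.toNat p) p)
          res ((fun j : Int => (j, PySem.List.pyGetD (0 :: c) j (0 : Int))) j))
      0 (PySem.List.pyRange 0 (PySem.List.len (0 :: c))) = _
  rw [← List.foldl_map
        (f := fun j : Int => (j, PySem.List.pyGetD (0 :: c) j (0 : Int)))
        (g := fun (res : Int) (pr : Int × Int) =>
          PySem.Int.mod
            (res + PySem.Int.powMod 3 (PySem.List.len (0 :: c) - 1 - pr.1).toNat p
                   * PySem.Int.powMod 2 pr.2.toNat p) p),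
      ← PySem.List.enumerate_eq_map_pyRange (0 :: c) 0]
  rw [PySem.List.enumerate_cons]
  simp only [List.foldl_cons]
  have := pvEnumFold p (PySem.List.len (0 :: c)) c 1
    (PySem.Int.mod (PySem.Int.powMod 3 (PySem.List.len (0 :: c) - 1).toNat p * PySem.Int.powMod 2 0 p) p)
    (by simp [PySem.List.len_eq]; ring)
  rw [← this]
  norm_num

lemma pvDfs_eq (p S : Int) :
    ∀ (N t : Nat) (start : Int), (S - start).toNat ≤ N → ∀ (r : Int) (acc : PySem.Dict Int Int),
      pvDfs p S t start r acc
        = (PySem.List.combinations (PySem.List.pyRange start S 1) t).foldl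
            (fun d c => d.modify (pvFinish p c r) 0 (· + 1)) acc := by
  intro N
  induction N with
  | zero =>
      intro t start hN r acc
      cases t with
      | zero => simp [pvDfs, PySem.List.combinations_zero, pvFinish]
      | succ t' =>
          unfold pvDfs
          rw [PySem.List.pyRange_one_eq_nil (by omega : S - ((t' : Int) + 1) + 1 ≤ start)]
          have hlt : (PySem.List.pyRange start S 1).length < t' + 1 := by
            rw [PySem.List.length_pyRange_one]; omega
          rw [PySem.List.combinations_eq_nil_of_length_lt _ hlt]
          simp
  | succ N' ih =>
      intro t start hN r acc
      cases t with
      | zero => simp [pvDfs, PySem.List.combinations_zero, pvFinish]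
      | succ t' =>
          unfold pvDfs
          by_cases hroom : start < S - ((t' : Int) + 1) + 1
          · have hS : start < S := by omega
            have hrec : (S - (start + 1)).toNat ≤ N' := by omega
            have hfirst :
                (PySem.List.combinations (PySem.List.pyRange (start + 1) S 1) t').foldl
                  (fun d c => d.modify (pvFinish p (start :: c) r) 0 (· + 1)) acc
                = pvDfs p S t' (start + 1)
                    (PySem.Int.mod (r + PySem.Int.powMod 3 t' p * PySem.Int.powMod 2 start.toNat p) p) acc := by
              rw [ih t' (start + 1) hrec]
              apply PySem.List.foldl_congr_mem
              intro d c hc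
              have hlen : c.length = t' := PySem.List.length_of_mem_combinations hc
              simp only [pvFinish, hlen]
            rw [PySem.List.pyRange_one_cons hroom]
            simp only [List.foldl_cons]
            rw [PySem.List.pyRange_one_cons hS, PySem.List.combinations_cons_succ,
              List.foldl_append, List.foldl_map, hfirst,
              ← ih (t' + 1) (start + 1) hrec]
            rfl
          · rw [PySem.List.pyRange_one_eq_nil (by omega : S - ((t' : Int) + 1) + 1 ≤ start)]
            have hlt : (PySem.List.pyRange start S 1).length < t' + 1 := by
              rw [PySem.List.length_pyRange_one]; omega
            rw [PySem.List.combinations_eq_nil_of_length_lt _ hlt]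
            simp

-- ===== VERDICT (by name: the statement is the Claim_ definition above) =====
theorem enum_corrsum_residues_spec : Claim_equal_enum_corrsum_residues := by
  intro k p max_count _hdom hpre
  obtain ⟨hk, _hp⟩ := hpre
  unfold Spec_enum_corrsum_residues enum_corrsum_residues enum_corrsum_residues_alt pvEnumCompositions
  by_cases hbig : (Nat.choose ((pvComputeS k).toNat - 1) (k - 1).toNat : Int) > max_count
  · rw [if_pos hbig, if_pos hbig]
  · rw [if_neg hbig, if_neg hbig]
    simp only [Option.some.injEq]
    rw [PySem.List.foldl_append_singleton_eq_map, List.nil_append, List.foldl_map]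
    have hlen : ∀ c ∈ PySem.List.combinations (PySem.List.pyRange 1 (pvComputeS k) 1) (k - 1).toNat,
        ((0 :: c).length : Int) = k := by
      intro c hc
      have := PySem.List.length_of_mem_combinations hc
      simp [this]; omega
    rw [PySem.List.foldl_congr_mem _ _
      (fun d c => d.modify
        (pvFinish p c (PySem.Int.mod (PySem.Int.powMod 3 (k - 1).toNat p * PySem.Int.powMod 2 0 p) p)) 0 (· + 1))
      _ (by
        intro d c hc
        rw [pvCorrsum_eq_finish p k c (hlen c hc)])]
    rw [← pvDfs_eq p (pvComputeS k) ((pvComputeS k) - 1).toNat (k - 1).toNat 1 (by omega)]
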